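-- pv_equiv track=rewrite | github.com/lowmason/bls-stats | src/bls_stats/bls/periods.py | _quarterly_range
-- ===== SOURCE A (Python) =====
-- def _quarterly_range(
--     start: tuple[int, int], end: tuple[int, int]
-- ) -> list[tuple[int, int]]:
--     sy, sq = start
--     ey, eq = end
--     periods: list[tuple[int, int]] = []
--     y, q = sy, sq
--     while (y, q) <= (ey, eq):
--         periods.append((y, q))
--         q += 1
--         if q > 4:
--             q = 1
--             y += 1
--     return periods
-- ===== SOURCE B (Python) =====
-- def _quarterly_range(
--     start: tuple[int, int], end: tuple[int, int]
-- ) -> list[tuple[int, int]]: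
--     sy, sq = start
--     ey, eq = end
--     periods: list[tuple[int, int]] = []
--     for y in range(sy, ey + 1):
--         first = sq if y == sy else 1
--         last = 4 if y < ey else min(eq, 4)
--         periods.extend((y, q) for q in range(first, last + 1))
--     return periods
-- ===== Notes on version B (the rewrite author's own statement) =====
-- stated objective: alternative
-- what changed: Replaces the stateful quarter-increment loop with its wrap/carry conditional by a per-year sweep: for each year in the span it emits that year's quarters with one range (starting at the start quarter in the first year and capped by the end quarter in the last), so no loop-carried (y, q) state or carry branch remains.
-- intended difference: When the start quarter exceeds 4 and (start <= end) lexicographically, A emits the nonexistent period (start_year, start_quarter) (e.g. quarter 7) before carrying on; B omits it, since a quarter beyond 4 is not a period of any year, which is the intended output of a quarterly-range function. — e.g. on _quarterly_range((1, 7), (2, 1)): A returns [(1, 7), (2, 1)], B returns [(2, 1)]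
import Mathlib
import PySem

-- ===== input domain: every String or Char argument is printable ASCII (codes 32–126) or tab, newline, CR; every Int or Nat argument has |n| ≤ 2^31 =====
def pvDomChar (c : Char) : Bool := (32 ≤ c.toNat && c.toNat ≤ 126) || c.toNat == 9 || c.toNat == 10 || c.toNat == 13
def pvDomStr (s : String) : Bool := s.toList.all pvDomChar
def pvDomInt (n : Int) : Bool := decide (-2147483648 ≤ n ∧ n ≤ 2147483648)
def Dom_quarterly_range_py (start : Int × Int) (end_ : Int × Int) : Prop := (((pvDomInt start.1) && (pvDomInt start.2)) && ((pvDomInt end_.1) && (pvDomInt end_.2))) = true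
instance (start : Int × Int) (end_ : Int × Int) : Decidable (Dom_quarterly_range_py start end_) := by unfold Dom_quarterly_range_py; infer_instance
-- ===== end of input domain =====

-- B sweeps the year span and emits each year's quarters with one range per year, instead of
-- A's stateful quarter-increment loop with its carry conditional (alternative decomposition,
-- same cost); on start quarters beyond 4 A emits a nonexistent period that B omits (see D_).


-- ===== PORT A =====
-- A's while loop; the Nat argument is fuel that only makes the recursion total
-- (the fuel chosen below is proved sufficient on every input the claim covers).
def qrLoop (ey eq : Int) : Nat → Int → Int → List (Int × Int) → List (Int × Int)
  | 0, _, _, periods => periods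
  | fuel + 1, y, q, periods =>
    -- Python tuple comparison (y, q) <= (ey, eq)
    if y < ey ∨ (y = ey ∧ q ≤ eq) then
      let periods := periods ++ [(y, q)]
      let q := q + 1
      if q > 4 then qrLoop ey eq fuel (y + 1) 1 periods
      else qrLoop ey eq fuel y q periods
    else periods

def quarterly_range_py (start : Int × Int) (end_ : Int × Int) : List (Int × Int) :=
  qrLoop end_.1 end_.2
    ((4 - start.2).toNat + (4 * (end_.1 - start.1) + 8).toNat + 4)
    start.1 start.2 []

-- ===== PORT B =====
-- Source B's per-year for loop with extend; 'first'/'last' are inlined into the range bounds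
def quarterly_range_py_alt (start : Int × Int) (end_ : Int × Int) : List (Int × Int) :=
  (PySem.List.pyRange start.1 (end_.1 + 1) 1).foldl
    (fun periods y =>
      periods ++ (PySem.List.pyRange (if y = start.1 then start.2 else 1)
        ((if y < end_.1 then 4 else min end_.2 4) + 1) 1).map (fun q => (y, q)))
    []

-- ===== PRECONDITION & SPEC =====
-- When the start quarter exceeds 4 and start <= end lexicographically, A emits the
-- nonexistent period (start_year, start_quarter) before carrying on; B omits it, since a
-- quarter beyond 4 is not a period of any year — the intended output of a quarterly range.
def D_quarterly_range_py (start : Int × Int) (end_ : Int × Int) : Prop :=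
  start.2 > 4 ∧ (start.1 < end_.1 ∨ (start.1 = end_.1 ∧ start.2 ≤ end_.2))
instance (start : Int × Int) (end_ : Int × Int) : Decidable (D_quarterly_range_py start end_) := by unfold D_quarterly_range_py; infer_instance

def Spec_quarterly_range_py (start : Int × Int) (end_ : Int × Int) (out : List (Int × Int)) : Prop := ¬ D_quarterly_range_py start end_ → out = quarterly_range_py_alt start end_
instance (start : Int × Int) (end_ : Int × Int) (out : List (Int × Int)) : Decidable (Spec_quarterly_range_py start end_ out) := by unfold Spec_quarterly_range_py; infer_instance

def pvDiffWitness_quarterly_range_py : (Int × Int) × (Int × Int) := ((1, 7), (2, 1))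
def pvDiffWitnessOut_quarterly_range_py : (List (Int × Int)) × (List (Int × Int)) :=
  ([(1, 7), (2, 1)], [(2, 1)])

-- ===== CLAIM (what is proved, stated in full; the proofs are below) =====
def Claim_unchanged_quarterly_range_py : Prop := ∀ (start : Int × Int) (end_ : Int × Int), Dom_quarterly_range_py start end_ → Spec_quarterly_range_py start end_ (quarterly_range_py start end_)
def Claim_changed_quarterly_range_py : Prop := Dom_quarterly_range_py (pvDiffWitness_quarterly_range_py.1) (pvDiffWitness_quarterly_range_py.2) ∧ D_quarterly_range_py (pvDiffWitness_quarterly_range_py.1) (pvDiffWitness_quarterly_range_py.2) ∧ quarterly_range_py (pvDiffWitness_quarterly_range_py.1) (pvDiffWitness_quarterly_range_py.2) = pvDiffWitnessOut_quarterly_range_py.1 ∧ quarterly_range_py_alt (pvDiffWitness_quarterly_range_py.1) (pvDiffWitness_quarterly_range_py.2) = pvDiffWitnessOut_quarterly_range_py.2 ∧ pvDiffWitnessOut_quarterly_range_py.1 ≠ pvDiffWitnessOut_quarterly_range_py.2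
def Claim_exact_quarterly_range_py : Prop := ∀ (start : Int × Int) (end_ : Int × Int), Dom_quarterly_range_py start end_ → D_quarterly_range_py start end_ → quarterly_range_py start end_ ≠ quarterly_range_py_alt start end_

-- ===== LEMMAS AND PROOFS =====

-- decoding the flat index of a canonical (y, q) gives back (y, q)
lemma qr_decode (y q : Int) (h1 : 1 ≤ q) (h4 : q ≤ 4) :
    (PySem.Int.floordiv (4 * y + (q - 1)) 4, PySem.Int.mod (4 * y + (q - 1)) 4 + 1) = (y, q) := by
  have hd : PySem.Int.floordiv (4 * y + (q - 1)) 4 = y := by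
    rw [PySem.Int.floordiv_eq_iff_of_pos (by norm_num)]
    omega
  have hm : PySem.Int.mod (4 * y + (q - 1)) 4 = q - 1 := by
    have := PySem.Int.floordiv_mul_add_mod (4 * y + (q - 1)) 4
    rw [hd] at this
    omega
  simp only [Prod.mk.injEq]
  exact ⟨hd, by omega⟩

-- canonical phase of A's loop: from a state with 1 ≤ q ≤ 4 it appends exactly
-- the decoded flat indices from 4*y+(q-1) up to the clamped end index
lemma qrLoop_canon (ey eq : Int) :
    ∀ (fuel : Nat) (y q : Int) (acc : List (Int × Int)), 1 ≤ q → q ≤ 4 →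
    ((4 * ey + min (max eq 0) 4) - (4 * y + q) + 1).toNat + 1 ≤ fuel →
    qrLoop ey eq fuel y q acc =
      acc ++ (PySem.List.pyRange (4 * y + (q - 1)) (4 * ey + min (max eq 0) 4) 1).map
        (fun i => (PySem.Int.floordiv i 4, PySem.Int.mod i 4 + 1)) := by
  intro fuel
  induction fuel with
  | zero => intro y q acc _ _ hf; omega
  | succ n ih =>
    intro y q acc hq1 hq4 hf
    by_cases hc : y < ey ∨ (y = ey ∧ q ≤ eq)
    · have hlt : 4 * y + (q - 1) < 4 * ey + min (max eq 0) 4 := by omega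
      rw [qrLoop, if_pos hc, PySem.List.pyRange_one_cons hlt, List.map_cons, qr_decode y q hq1 hq4]
      by_cases hw : q + 1 > 4
      · rw [if_pos hw, ih (y + 1) 1 _ (by omega) (by omega) (by omega)]
        have h2 : 4 * (y + 1) + (1 - 1) = 4 * y + (q - 1) + 1 := by omega
        rw [h2]
        simp
      · rw [if_neg hw, ih y (q + 1) _ (by omega) (by omega) (by omega)]
        have h2 : 4 * y + (q + 1 - 1) = 4 * y + (q - 1) + 1 := by omega
        rw [h2]
        simp
    · rw [qrLoop, if_neg hc, PySem.List.pyRange_one_eq_nil (by omega)]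
      simp

-- when the comparison fails at (y, q), the flat tail range is empty
lemma qr_tail_nil (ey eq y q : Int)
    (hc : ¬(y < ey ∨ (y = ey ∧ q ≤ eq))) :
    PySem.List.pyRange (4 * (y + 1)) (4 * ey + min (max eq 0) 4) 1 = [] := by
  apply PySem.List.pyRange_one_eq_nil
  push Not at hc
  omega

-- head phase of A's loop: from any state with q ≤ 4 (q possibly non-canonical) it appends the
-- first-year quarters from q up to the closed-form bound hi, then the decoded flat tail
lemma qrLoop_head (ey eq : Int) :
    ∀ (n : Nat) (fuel : Nat) (y q : Int) (acc : List (Int × Int)), q ≤ 4 → (4 - q).toNat = n →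
    n + ((4 * ey + min (max eq 0) 4) - 4 * (y + 1) + 1).toNat + 2 ≤ fuel →
    qrLoop ey eq fuel y q acc =
      acc ++ (PySem.List.pyRange q (if y < ey then 5 else if y = ey then min 5 (eq + 1) else q) 1).map
        (fun r => (y, r))
      ++ (PySem.List.pyRange (4 * (y + 1)) (4 * ey + min (max eq 0) 4) 1).map
        (fun i => (PySem.Int.floordiv i 4, PySem.Int.mod i 4 + 1)) := by
  intro n
  induction n with
  | zero =>
    intro fuel y q acc hq4 hn hf
    have hq : q = 4 := by omega
    subst hq
    obtain ⟨m, rfl⟩ : ∃ m, fuel = m + 1 := ⟨fuel - 1, by omega⟩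
    by_cases hc : y < ey ∨ (y = ey ∧ (4:Int) ≤ eq)
    · have h5 : (if y < ey then (5:Int) else if y = ey then min 5 (eq + 1) else 4) = 5 := by
        split_ifs <;> omega
      rw [qrLoop, if_pos hc, if_pos (by norm_num),
        qrLoop_canon ey eq m (y + 1) 1 _ (by omega) (by omega) (by omega), h5,
        PySem.List.pyRange_one_cons (by norm_num : (4:Int) < 5),
        PySem.List.pyRange_one_eq_nil (by norm_num : (5:Int) ≤ 4 + 1)]
      have h2 : 4 * (y + 1) + (1 - 1) = 4 * (y + 1) := by omega
      rw [h2]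
      simp
    · have hnil : PySem.List.pyRange 4 (if y < ey then (5:Int) else if y = ey then min 5 (eq + 1) else 4) 1 = [] := by
        apply PySem.List.pyRange_one_eq_nil
        push Not at hc
        split_ifs <;> omega
      rw [qrLoop, if_neg hc, hnil, qr_tail_nil ey eq y 4 hc]
      simp
  | succ n ih =>
    intro fuel y q acc hq4 hn hf
    have hq : q ≤ 3 := by omega
    obtain ⟨m, rfl⟩ : ∃ m, fuel = m + 1 := ⟨fuel - 1, by omega⟩
    by_cases hc : y < ey ∨ (y = ey ∧ q ≤ eq)
    · have hqlt : q < (if y < ey then (5:Int) else if y = ey then min 5 (eq + 1) else q) := by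
        split_ifs <;> omega
      rw [qrLoop, if_pos hc, if_neg (by omega),
        ih m y (q + 1) _ (by omega) (by omega) (by omega),
        PySem.List.pyRange_one_cons hqlt]
      have he : (if y < ey then (5:Int) else if y = ey then min 5 (eq + 1) else q + 1)
          = (if y < ey then (5:Int) else if y = ey then min 5 (eq + 1) else q) := by
        split_ifs <;> omega
      rw [he]
      simp
    · have hnil : PySem.List.pyRange q (if y < ey then (5:Int) else if y = ey then min 5 (eq + 1) else q) 1 = [] := by
        apply PySem.List.pyRange_one_eq_nil
        push Not at hc
        split_ifs <;> omega
      rw [qrLoop, if_neg hc, hnil, qr_tail_nil ey eq y q hc]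
      simp

-- one year's quarters, listed 1..m, equal the decoded flat indices 4*y.. 4*y+m-1
lemma qr_seg (y m : Int) (h0 : 0 ≤ m) (h4 : m ≤ 4) :
    (PySem.List.pyRange 1 (m + 1) 1).map (fun q => ((y, q) : Int × Int)) =
    (PySem.List.pyRange (4 * y) (4 * y + m) 1).map
      (fun i => (PySem.Int.floordiv i 4, PySem.Int.mod i 4 + 1)) := by
  rw [PySem.List.pyRange_one, PySem.List.pyRange_one]
  have h1 : (m + 1 - 1).toNat = m.toNat := by omega
  have h2 : (4 * y + m - 4 * y).toNat = m.toNat := by omega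
  rw [h1, h2, List.map_map, List.map_map]
  apply List.map_congr_left
  intro k hk
  rw [List.mem_range] at hk
  have hk4 : (k : Int) ≤ 3 := by omega
  have := qr_decode y ((k : Int) + 1) (by omega) (by omega)
  simp only [Function.comp_apply]
  have e1 : 4 * y + (k : Int) = 4 * y + ((k : Int) + 1 - 1) := by ring
  have e2 : 1 + (k : Int) = (k : Int) + 1 := by ring
  rw [e1, this, e2]

-- the per-year flatMap over full years y..ey (start quarter 1) equals the decoded flat range
lemma qr_years (ey eq : Int) :
    ∀ (n : Nat) (y : Int), (ey + 1 - y).toNat ≤ n →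
    (PySem.List.pyRange y (ey + 1) 1).flatMap
      (fun z => (PySem.List.pyRange 1 ((if z < ey then 4 else min eq 4) + 1) 1).map
        (fun q => ((z, q) : Int × Int))) =
    (PySem.List.pyRange (4 * y) (4 * ey + min (max eq 0) 4) 1).map
      (fun i => (PySem.Int.floordiv i 4, PySem.Int.mod i 4 + 1)) := by
  intro n
  induction n with
  | zero =>
    intro y hn
    rw [PySem.List.pyRange_one_eq_nil (by omega), PySem.List.pyRange_one_eq_nil (by omega)]
    simp
  | succ n ih =>
    intro y hn
    by_cases hy : y ≤ ey
    · rw [PySem.List.pyRange_one_cons (by omega), List.flatMap_cons, ih (y + 1) (by omega)]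
      by_cases hlt : y < ey
      · rw [if_pos hlt, qr_seg y 4 (by omega) (by omega),
          PySem.List.pyRange_one_append (4 * y) (4 * (y + 1)) (4 * ey + min (max eq 0) 4)
            (by omega) (by omega), List.map_append]
        have h2 : 4 * y + 4 = 4 * (y + 1) := by ring
        rw [h2]
      · have hye : y = ey := by omega
        rw [if_neg hlt, PySem.List.pyRange_one_eq_nil (show 4 * ey + min (max eq 0) 4 ≤ 4 * (y + 1) by omega)]
        by_cases hq : 1 ≤ eq
        · rw [qr_seg y (min eq 4) (by omega) (by omega)]
          have h2 : 4 * y + min eq 4 = 4 * ey + min (max eq 0) 4 := by omega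
          rw [h2]
          simp
        · rw [PySem.List.pyRange_one_eq_nil (show min eq 4 + 1 ≤ 1 by omega),
            PySem.List.pyRange_one_eq_nil (show 4 * ey + min (max eq 0) 4 ≤ 4 * y by omega)]
          simp
    · rw [PySem.List.pyRange_one_eq_nil (by omega), PySem.List.pyRange_one_eq_nil (by omega)]
      simp

-- B as a flatMap over the year range
lemma qr_alt_flatMap (start end_ : Int × Int) :
    quarterly_range_py_alt start end_ =
    (PySem.List.pyRange start.1 (end_.1 + 1) 1).flatMap
      (fun y => (PySem.List.pyRange (if y = start.1 then start.2 else 1)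
        ((if y < end_.1 then 4 else min end_.2 4) + 1) 1).map (fun q => ((y, q) : Int × Int))) := by
  unfold quarterly_range_py_alt
  rw [PySem.List.foldl_append_eq_flatMap]
  simp

-- the accumulator is a prefix of A's loop result
lemma qrLoop_acc (ey eq : Int) :
    ∀ (fuel : Nat) (y q : Int) (acc : List (Int × Int)),
    qrLoop ey eq fuel y q acc = acc ++ qrLoop ey eq fuel y q [] := by
  intro fuel
  induction fuel with
  | zero => intro y q acc; simp [qrLoop]
  | succ n ih =>
    intro y q acc
    rw [qrLoop, qrLoop]
    by_cases hc : y < ey ∨ (y = ey ∧ q ≤ eq)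
    · rw [if_pos hc, if_pos hc]
      simp only []
      by_cases hw : q + 1 > 4
      · rw [if_pos hw, if_pos hw, ih _ _ (acc ++ [(y, q)]), ih _ _ ([] ++ [(y, q)])]
        simp
      · rw [if_neg hw, if_neg hw, ih _ _ (acc ++ [(y, q)]), ih _ _ ([] ++ [(y, q)])]
        simp
    · rw [if_neg hc, if_neg hc]
      simp

-- every element of B has a quarter at most 4
lemma qr_alt_snd_le (start end_ : Int × Int) (p : Int × Int)
    (hp : p ∈ quarterly_range_py_alt start end_) : p.2 ≤ 4 := by
  rw [qr_alt_flatMap] at hp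
  rw [List.mem_flatMap] at hp
  obtain ⟨y, _, hp⟩ := hp
  rw [List.mem_map] at hp
  obtain ⟨q, hq, rfl⟩ := hp
  rw [PySem.List.mem_pyRange_one] at hq
  have : (if y < end_.1 then (4:Int) else min end_.2 4) ≤ 4 := by split_ifs <;> omega
  simp only []
  omega

-- ===== VERDICT (by name: the statements are the Claim_ definitions above) =====
theorem quarterly_range_py_spec : Claim_unchanged_quarterly_range_py := by
  intro start end_ _ hnd
  obtain ⟨sy, sq⟩ := start
  obtain ⟨ey, eq⟩ := end_
  unfold D_quarterly_range_py at hnd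
  simp only [not_and, not_or] at hnd
  unfold quarterly_range_py
  rw [qr_alt_flatMap]
  simp only []
  by_cases hsq : sq ≤ 4
  · -- canonical (or low) start quarter: A = first-year head ++ flat tail, and so is B
    rw [qrLoop_head ey eq (4 - sq).toNat _ sy sq [] hsq rfl (by simp; omega)]
    by_cases hy : sy ≤ ey
    · rw [PySem.List.pyRange_one_cons (show sy < ey + 1 by omega), List.flatMap_cons]
      have hcong : (PySem.List.pyRange (sy + 1) (ey + 1) 1).flatMap
          (fun y => (PySem.List.pyRange (if y = sy then sq else 1)
            ((if y < ey then 4 else min eq 4) + 1) 1).map (fun q => ((y, q) : Int × Int))) =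
          (PySem.List.pyRange (sy + 1) (ey + 1) 1).flatMap
          (fun y => (PySem.List.pyRange 1
            ((if y < ey then 4 else min eq 4) + 1) 1).map (fun q => ((y, q) : Int × Int))) := by
        apply List.flatMap_congr
        intro y hy'
        rw [PySem.List.mem_pyRange_one] at hy'
        rw [if_neg (by omega)]
      rw [hcong, qr_years ey eq (ey + 1 - (sy + 1)).toNat (sy + 1) (by omega),
        if_pos rfl]
      have hhi : ((if sy < ey then (4:Int) else min eq 4) + 1) =
          (if sy < ey then (5:Int) else if sy = ey then min 5 (eq + 1) else sq) := by
        split_ifs <;> omega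
      rw [hhi]
      have h2 : 4 * (sy + 1) = 4 * sy + 4 := by ring
      simp [h2]
    · -- start year beyond end year: everything is empty
      rw [PySem.List.pyRange_one_eq_nil (show ey + 1 ≤ sy by omega),
        PySem.List.pyRange_one_eq_nil (show (if sy < ey then (5:Int) else if sy = ey then min 5 (eq + 1) else sq) ≤ sq by split_ifs <;> omega),
        PySem.List.pyRange_one_eq_nil (show 4 * ey + min (max eq 0) 4 ≤ 4 * (sy + 1) by omega)]
      simp
  · -- sq > 4 outside D_: the comparison fails at once, and B's ranges are all empty
    have hc : ¬(sy < ey ∨ (sy = ey ∧ sq ≤ eq)) := by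
      have h := hnd (by omega)
      push Not
      exact ⟨by omega, fun he => by have := h.2 he; omega⟩
    obtain ⟨m, hm⟩ : ∃ m, ((4 - sq).toNat + (4 * (ey - sy) + 8).toNat + 4) = m + 1 :=
      ⟨(4 - sq).toNat + (4 * (ey - sy) + 8).toNat + 3, by omega⟩
    rw [hm, qrLoop, if_neg hc]
    by_cases hy : sy ≤ ey
    · have hye : sy = ey := by omega
      subst hye
      rw [PySem.List.pyRange_one_cons (show sy < sy + 1 by omega),
        PySem.List.pyRange_one_eq_nil (le_refl (sy + 1)), List.flatMap_cons,
        if_pos rfl, PySem.List.pyRange_one_eq_nil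
          (show (if sy < sy then (4:Int) else min eq 4) + 1 ≤ sq by split_ifs <;> omega)]
      simp
    · rw [PySem.List.pyRange_one_eq_nil (show ey + 1 ≤ sy by omega)]
      simp

theorem quarterly_range_py_changed : Claim_changed_quarterly_range_py := by
  unfold Claim_changed_quarterly_range_py
  decide

theorem quarterly_range_py_tight : Claim_exact_quarterly_range_py := by
  intro start end_ _ hd heq
  obtain ⟨sy, sq⟩ := start
  obtain ⟨ey, eq⟩ := end_
  unfold D_quarterly_range_py at hd
  simp only [] at hd
  obtain ⟨hq, hc⟩ := hd
  have hmem : ((sy, sq) : Int × Int) ∈ quarterly_range_py (sy, sq) (ey, eq) := by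
    unfold quarterly_range_py
    obtain ⟨m, hm⟩ : ∃ m, ((4 - sq).toNat + (4 * (ey - sy) + 8).toNat + 4) = m + 1 :=
      ⟨(4 - sq).toNat + (4 * (ey - sy) + 8).toNat + 3, by omega⟩
    simp only []
    rw [hm, qrLoop, if_pos hc]
    simp only []
    rw [if_pos (show sq + 1 > 4 by omega), qrLoop_acc]
    simp
  rw [heq] at hmem
  have := qr_alt_snd_le (sy, sq) (ey, eq) (sy, sq) hmem
  simp only [] at this
  omega
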